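-- pv_equiv track=rewrite | github.com/Lucenix/LA2 | treino4/uniao.py | aux
-- ===== SOURCE A (Python) =====
-- def complete(p,c,i,ind):
--     return len(c) == i
--
-- def extensions(p,c,ind):
--     return [a for a in p if p.index(a)>ind and a not in c]
--
-- def valid(p,c,m):
--     new = set()
--     for cand in c:
--         new = new.union(cand)
--     return len(new) == len(m)
--
-- def aux(p,c,i,m, ind):
--     if complete(p,c,i,ind):
--         return valid(p,c,m)
--
--     for x in extensions(p,c,ind):
--         c.append(x)
--         if aux(p,c,i,m,p.index(x)):
--             return True
--         c.pop()
--     return False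
-- ===== SOURCE B (Python) =====
-- def aux(p, c, i, m, ind):
--     # Iterative powerset-fold instead of recursive backtracking:
--     # collect the distinct eligible candidate subsets once, then fold over
--     # them maintaining all (partial union, picked count) pairs, and check
--     # whether some selection of exactly i - len(c) candidates covers m.
--     need = i - len(c)
--     if need < 0:
--         return False
--     cands = []
--     for a in p:
--         if p.index(a) > ind and a not in c and a not in cands:
--             cands.append(a)
--     base = set()
--     for s in c:
--         base |= set(s)
--     partials = [(base, 0)]
--     for a in cands:
--         partials = partials + [(u | set(a), k + 1) for (u, k) in partials]
--     return any(k == need and len(u) == len(m) for (u, k) in partials)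
-- ===== Notes on version B (the rewrite author's own statement) =====
-- stated objective: alternative
-- what changed: Replaces the mutating recursive backtracking with a non-recursive powerset fold: the distinct eligible candidate subsets are collected once, then one pass over them maintains every (partial union, picked count) pair and the answer is whether some pair with exactly i-len(c) picks has a union the size of m.
import Mathlib
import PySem

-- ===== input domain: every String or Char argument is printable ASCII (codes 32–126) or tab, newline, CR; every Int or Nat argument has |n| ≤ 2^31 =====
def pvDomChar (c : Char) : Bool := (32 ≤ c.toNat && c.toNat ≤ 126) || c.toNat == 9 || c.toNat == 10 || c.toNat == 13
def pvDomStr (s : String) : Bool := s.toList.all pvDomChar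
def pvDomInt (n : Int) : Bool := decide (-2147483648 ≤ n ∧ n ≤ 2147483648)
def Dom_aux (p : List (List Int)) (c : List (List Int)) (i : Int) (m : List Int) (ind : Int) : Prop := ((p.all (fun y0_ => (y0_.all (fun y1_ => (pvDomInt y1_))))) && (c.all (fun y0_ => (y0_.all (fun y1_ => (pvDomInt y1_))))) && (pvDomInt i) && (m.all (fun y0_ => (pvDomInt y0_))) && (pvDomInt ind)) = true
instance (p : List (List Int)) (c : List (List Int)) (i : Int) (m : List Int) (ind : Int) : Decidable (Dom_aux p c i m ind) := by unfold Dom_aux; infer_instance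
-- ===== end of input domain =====

-- ===== PORT A =====
-- Header: B replaces A's mutating recursive backtracking by a single non-recursive
-- powerset fold over the once-computed distinct candidate list (objective: alternative).
-- NOTE on side effects: Python A mutates its argument c in place (append/pop; on a True
-- result the chosen subsets are left appended to c); the equivalence proved here is
-- about the RETURN value only.

-- shared primitive: Python's p.index(a), exact whenever a ∈ p (the only way both programs call it)
def pyIdx (p : List (List Int)) (a : List Int) : Int :=
  ((PySem.List.index? p a).getD 0 : Nat)

def complete (p c : List (List Int)) (i : Int) (ind : Int) : Bool :=
  (c.length : Int) == i

def extensions (p c : List (List Int)) (ind : Int) : List (List Int) :=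
  p.filter (fun a => decide (ind < pyIdx p a) && !(c.contains a))

-- shared helper: the loop "new = set(); for cand in c: new = new.union(cand)"
-- (it appears verbatim in A's valid and as B's base loop)
def unionAll (c : List (List Int)) : PySem.Set Int :=
  c.foldl (fun new cand => PySem.Set.union new cand) PySem.Set.empty

def valid (p c : List (List Int)) (m : List Int) : Bool :=
  PySem.Set.len (unionAll c) == (m.length : Int)

-- termination measure for A's backtracking: distinct values of p not yet in c
def auxMeasure (p c : List (List Int)) : Nat :=
  ((PySem.Set.ofList p).filter (fun a => !(c.contains a))).length

theorem auxMeasure_lt (p c : List (List Int)) (ind : Int) (x : List Int)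
    (hx : x ∈ extensions p c ind) : auxMeasure p (c ++ [x]) < auxMeasure p c := by
  have hmem := List.mem_filter.mp hx
  obtain ⟨hxp, hcond⟩ := hmem
  have hxc : x ∉ c := by
    have := (Bool.and_eq_true _ _).mp hcond |>.2
    simpa using this
  unfold auxMeasure
  have hfun : ∀ a ∈ PySem.Set.ofList p, (!((c ++ [x]).contains a))
      = ((!(a == x)) && !(c.contains a)) := by
    intro a _
    by_cases h1 : a ∈ c <;> by_cases h2 : a = x <;> simp [h1, h2]
  rw [List.filter_congr hfun, ← List.filter_filter]
  apply List.length_filter_lt_length_iff_exists.mpr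
  refine ⟨x, ?_, by simp⟩
  exact List.mem_filter.mpr ⟨by simpa using hxp, by simpa using hxc⟩

def aux (p : List (List Int)) (c : List (List Int)) (i : Int) (m : List Int) (ind : Int) : Bool :=
  if complete p c i ind then
    valid p c m
  else
    (extensions p c ind).attach.any
      (fun x => aux p (c ++ [x.1]) i m (pyIdx p x.1))
termination_by auxMeasure p c
decreasing_by exact auxMeasure_lt p c ind x.1 x.2

-- ===== PORT B =====
-- the candidate-collecting loop of Source B
def cand (p c : List (List Int)) (ind : Int) : List (List Int) :=
  p.foldl (fun cands a =>
    if ind < pyIdx p a ∧ a ∉ c ∧ a ∉ cands then cands ++ [a] else cands) []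

def aux_alt (p : List (List Int)) (c : List (List Int)) (i : Int) (m : List Int) (ind : Int) : Bool :=
  let need : Int := i - c.length
  if need < 0 then false
  else
    let cands := cand p c ind
    let base := unionAll c
    let partials := cands.foldl
      (fun ps a => ps ++ ps.map (fun uk => (PySem.Set.union uk.1 a, uk.2 + 1)))
      [(base, (0 : Int))]
    partials.any (fun uk => uk.2 == need && (PySem.Set.len uk.1 == (m.length : Int)))

-- ===== PRECONDITION & SPEC =====
def Spec_aux (p : List (List Int)) (c : List (List Int)) (i : Int) (m : List Int) (ind : Int) (out : Bool) : Prop := out = aux_alt p c i m ind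
instance (p : List (List Int)) (c : List (List Int)) (i : Int) (m : List Int) (ind : Int) (out : Bool) : Decidable (Spec_aux p c i m ind out) := by unfold Spec_aux; infer_instance

-- ===== CLAIM (what is proved, stated in full; the proofs are below) =====
def Claim_equal_aux : Prop := ∀ (p : List (List Int)) (c : List (List Int)) (i : Int) (m : List Int) (ind : Int), Dom_aux p c i m ind → Spec_aux p c i m ind (aux p c i m ind)

-- ===== LEMMAS AND PROOFS =====

-- facts about pyIdx -------------------------------------------------------

theorem index?_append_cons_self (pre suf : List (List Int)) (a : List Int) (h : a ∉ pre) :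
    PySem.List.index? (pre ++ a :: suf) a = some pre.length := by
  induction pre with
  | nil => simpa using PySem.List.index?_cons_self a suf
  | cons b t ih =>
    have hba : b ≠ a := by intro e; exact h (by simp [e])
    have ht : a ∉ t := fun hm => h (by simp [hm])
    rw [List.cons_append, PySem.List.index?_cons_of_ne (t ++ a :: suf) hba, ih ht]
    simp

theorem pyIdx_append_cons_self (pre suf : List (List Int)) (a : List Int) (h : a ∉ pre) :
    pyIdx (pre ++ a :: suf) a = pre.length := by
  unfold pyIdx
  rw [index?_append_cons_self pre suf a h]
  simp

-- the candidate list -------------------------------------------------------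

theorem cand_inv (p c : List (List Int)) (ind : Int) :
    ∀ (l pre acc : List (List Int)), p = pre ++ l →
    (∀ b ∈ acc, b ∈ pre ∧ ind < pyIdx p b ∧ b ∉ c) →
    (∀ b ∈ pre, ind < pyIdx p b → b ∉ c → b ∈ acc) →
    acc.Pairwise (fun x y => pyIdx p x < pyIdx p y) →
    (∀ b ∈ acc, pyIdx p b < (pre.length : Int)) →
    (∀ b, b ∈ l.foldl (fun cands a =>
        if ind < pyIdx p a ∧ a ∉ c ∧ a ∉ cands then cands ++ [a] else cands) acc ↔
      (b ∈ p ∧ ind < pyIdx p b ∧ b ∉ c)) ∧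
    (l.foldl (fun cands a =>
        if ind < pyIdx p a ∧ a ∉ c ∧ a ∉ cands then cands ++ [a] else cands) acc).Pairwise
      (fun x y => pyIdx p x < pyIdx p y) := by
  intro l
  induction l with
  | nil =>
    intro pre acc hp hacc hpre hpw _
    simp only [List.foldl_nil]
    constructor
    · intro b
      constructor
      · intro hb
        obtain ⟨h1, h2, h3⟩ := hacc b hb
        exact ⟨by rw [hp]; simp [h1], h2, h3⟩
      · intro ⟨hbp, h2, h3⟩
        have : b ∈ pre := by
          rw [hp] at hbp; simpa using hbp
        exact hpre b this h2 h3
    · exact hpw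
  | cons a l ih =>
    intro pre acc hp hacc hpre hpw hlt
    simp only [List.foldl_cons]
    by_cases hcond : ind < pyIdx p a ∧ a ∉ c ∧ a ∉ acc
    · rw [if_pos hcond]
      obtain ⟨hidx, hanc, hana⟩ := hcond
      have hanp : a ∉ pre := by
        intro hmem
        exact hana (hpre a hmem hidx hanc)
      have hidxa : pyIdx p a = (pre.length : Int) := by
        have := pyIdx_append_cons_self pre l a hanp
        rw [hp]; exact_mod_cast this
      apply ih (pre ++ [a]) (acc ++ [a]) (by rw [hp]; simp)
      · intro b hb
        rcases List.mem_append.mp hb with hb | hb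
        · obtain ⟨h1, h2, h3⟩ := hacc b hb
          exact ⟨by simp [h1], h2, h3⟩
        · have : b = a := by simpa using hb
          subst this
          exact ⟨by simp, hidx, hanc⟩
      · intro b hb hb2 hb3
        rcases List.mem_append.mp hb with hb | hb
        · exact List.mem_append.mpr (Or.inl (hpre b hb hb2 hb3))
        · have : b = a := by simpa using hb
          subst this; simp
      · rw [List.pairwise_append]
        refine ⟨hpw, by simp, ?_⟩
        intro u hu y hy
        have hya : y = a := by simpa using hy
        rw [hya, hidxa]
        exact hlt u hu
      · intro b hb
        rcases List.mem_append.mp hb with hb | hb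
        · calc pyIdx p b < (pre.length : Int) := hlt b hb
          _ ≤ ((pre ++ [a]).length : Int) := by simp
        · have : b = a := by simpa using hb
          subst this
          rw [hidxa]; simp
    · rw [if_neg hcond]
      apply ih (pre ++ [a]) acc (by rw [hp]; simp)
      · intro b hb
        obtain ⟨h1, h2, h3⟩ := hacc b hb
        exact ⟨by simp [h1], h2, h3⟩
      · intro b hb hb2 hb3
        rcases List.mem_append.mp hb with hb | hb
        · exact hpre b hb hb2 hb3
        · have : b = a := by simpa using hb
          subst this
          by_contra hna
          exact hcond ⟨hb2, hb3, hna⟩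
      · exact hpw
      · intro b hb
        calc pyIdx p b < (pre.length : Int) := hlt b hb
        _ ≤ ((pre ++ [a]).length : Int) := by simp

theorem mem_cand (p c : List (List Int)) (ind : Int) (b : List Int) :
    b ∈ cand p c ind ↔ (b ∈ p ∧ ind < pyIdx p b ∧ b ∉ c) := by
  have := cand_inv p c ind p [] [] (by simp) (by simp) (by simp) (by simp) (by simp)
  exact this.1 b

theorem pairwise_cand (p c : List (List Int)) (ind : Int) :
    (cand p c ind).Pairwise (fun x y => pyIdx p x < pyIdx p y) := by
  have := cand_inv p c ind p [] [] (by simp) (by simp) (by simp) (by simp) (by simp)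
  exact this.2

theorem nodup_cand (p c : List (List Int)) (ind : Int) : (cand p c ind).Nodup :=
  (pairwise_cand p c ind).imp (fun h => by intro e; subst e; exact lt_irrefl _ h)

theorem mem_extensions (p c : List (List Int)) (ind : Int) (b : List Int) :
    b ∈ extensions p c ind ↔ (b ∈ p ∧ ind < pyIdx p b ∧ b ∉ c) := by
  unfold extensions
  rw [List.mem_filter]
  simp

-- two strictly idx-increasing lists with the same members are equal
theorem eq_of_pairwise_lt_of_mem_iff (key : List Int → Int) :
    ∀ (l₁ l₂ : List (List Int)), l₁.Pairwise (fun x y => key x < key y) →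
    l₂.Pairwise (fun x y => key x < key y) → (∀ b, b ∈ l₁ ↔ b ∈ l₂) → l₁ = l₂ := by
  intro l₁
  induction l₁ with
  | nil =>
    intro l₂ _ _ hmem
    cases l₂ with
    | nil => rfl
    | cons b t => exact absurd ((hmem b).mpr (by simp)) (by simp)
  | cons a t ih =>
    intro l₂ hp1 hp2 hmem
    cases l₂ with
    | nil => exact absurd ((hmem a).mp (by simp)) (by simp)
    | cons b t₂ =>
      have hab : a = b := by
        by_contra hne
        have ha2 : a ∈ t₂ := by
          have := (hmem a).mp (by simp)
          rcases List.mem_cons.mp this with h | h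
          · exact absurd h hne
          · exact h
        have hb1 : b ∈ t := by
          have := (hmem b).mpr (by simp)
          rcases List.mem_cons.mp this with h | h
          · exact absurd h.symm hne
          · exact h
        have h1 : key a < key b := (List.pairwise_cons.mp hp1).1 b hb1
        have h2 : key b < key a := (List.pairwise_cons.mp hp2).1 a ha2
        omega
      subst hab
      congr 1
      apply ih t₂ (List.pairwise_cons.mp hp1).2 (List.pairwise_cons.mp hp2).2
      intro x
      constructor
      · intro hx
        have hlt := (List.pairwise_cons.mp hp1).1 x hx
        have : x ∈ a :: t₂ := (hmem x).mp (by simp [hx])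
        rcases List.mem_cons.mp this with h | h
        · subst h; omega
        · exact h
      · intro hx
        have hlt := (List.pairwise_cons.mp hp2).1 x hx
        have : x ∈ a :: t := (hmem x).mpr (by simp [hx])
        rcases List.mem_cons.mp this with h | h
        · subst h; omega
        · exact h

-- after choosing x, the new candidate list is exactly the tail after x
theorem cand_suffix (p c : List (List Int)) (ind : Int) (x : List Int)
    (hx : x ∈ cand p c ind) :
    ∃ l₁ l₂, cand p c ind = l₁ ++ x :: l₂ ∧ x ∉ l₁ ∧
      cand p (c ++ [x]) (pyIdx p x) = l₂ := by
  obtain ⟨l₁, l₂, hdec⟩ := List.append_of_mem hx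
  have hnd := nodup_cand p c ind
  rw [hdec] at hnd
  have hxl₁ : x ∉ l₁ := by
    intro hmem
    have := List.disjoint_of_nodup_append hnd
    exact this hmem (by simp)
  have hxl₂ : x ∉ l₂ := by
    have := (List.nodup_append.mp hnd).2.1
    exact (List.nodup_cons.mp this).1
  refine ⟨l₁, l₂, hdec, hxl₁, ?_⟩
  have hpw := pairwise_cand p c ind
  rw [hdec] at hpw
  have hpwl₂ : l₂.Pairwise (fun a b => pyIdx p a < pyIdx p b) :=
    (List.pairwise_cons.mp (List.pairwise_append.mp hpw).2.1).2
  apply eq_of_pairwise_lt_of_mem_iff (pyIdx p) _ _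
    (pairwise_cand p (c ++ [x]) (pyIdx p x)) hpwl₂
  intro b
  rw [mem_cand]
  constructor
  · intro ⟨hbp, hgt, hbc⟩
    have hbnc : b ∉ c := fun h => hbc (by simp [h])
    have hbnx : b ≠ x := by
      intro e; subst e; exact lt_irrefl _ hgt
    have hind : ind < pyIdx p b := by
      have hxind : ind < pyIdx p x := ((mem_cand p c ind x).mp hx).2.1
      omega
    have hbL : b ∈ cand p c ind := (mem_cand p c ind b).mpr ⟨hbp, hind, hbnc⟩
    rw [hdec] at hbL
    rcases List.mem_append.mp hbL with h | h
    · exfalso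
      have := (List.pairwise_append.mp hpw).2.2 b h x (by simp)
      omega
    · rcases List.mem_cons.mp h with h | h
      · exact absurd h hbnx
      · exact h
  · intro hb
    have hbL : b ∈ cand p c ind := by rw [hdec]; simp [hb]
    obtain ⟨hbp, _, hbnc⟩ := (mem_cand p c ind b).mp hbL
    have hgt : pyIdx p x < pyIdx p b :=
      (List.pairwise_cons.mp (List.pairwise_append.mp hpw).2.1).1 b hb
    exact ⟨hbp, hgt, by
      intro hmem
      rcases List.mem_append.mp hmem with h | h
      · exact hbnc h
      · have : b = x := by simpa using h
        subst this
        exact lt_irrefl _ hgt⟩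

-- union bookkeeping --------------------------------------------------------

theorem unionAll_append (c S : List (List Int)) :
    unionAll (c ++ S) = S.foldl (fun s l => PySem.Set.union s l) (unionAll c) := by
  unfold unionAll
  rw [List.foldl_append]

-- the powerset fold --------------------------------------------------------

def powL (l : List (List Int)) : List (List (List Int)) :=
  l.foldl (fun acc a => acc ++ acc.map (· ++ [a])) [[]]

theorem mem_powL (l : List (List Int)) :
    ∀ S : List (List Int), S ∈ powL l ↔ S.Sublist l := by
  induction l using List.reverseRecOn with
  | nil => intro S; simp [powL]
  | append_singleton l a ih =>
    intro S
    unfold powL at *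
    rw [List.foldl_append]
    simp only [List.foldl_cons, List.foldl_nil]
    constructor
    · intro h
      rcases List.mem_append.mp h with h | h
      · exact ((ih S).mp h).trans (List.sublist_append_left l [a])
      · obtain ⟨T, hT, rfl⟩ := List.mem_map.mp h
        exact ((ih T).mp hT).append (List.Sublist.refl [a])
    · intro h
      obtain ⟨s₁, s₂, rfl, h₁, h₂⟩ := List.sublist_append_iff.mp h
      cases s₂ with
      | nil => exact List.mem_append.mpr (Or.inl ((ih (s₁ ++ [])).mpr (by simpa using h₁)))
      | cons y t =>
        have hyt : y = a ∧ t = [] := by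
          cases h₂ with
          | cons _ h' => simp at h'
          | cons₂ _ h' => exact ⟨rfl, List.sublist_nil.mp h'⟩
        obtain ⟨rfl, rfl⟩ := hyt
        exact List.mem_append.mpr (Or.inr (List.mem_map.mpr ⟨s₁, (ih s₁).mpr h₁, rfl⟩))

theorem partials_eq (base : PySem.Set Int) (l : List (List Int)) :
    l.foldl (fun ps a => ps ++ ps.map (fun uk => (PySem.Set.union uk.1 a, uk.2 + 1)))
      [(base, (0 : Int))]
    = (powL l).map (fun S =>
        (S.foldl (fun s x => PySem.Set.union s x) base, (S.length : Int))) := by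
  induction l using List.reverseRecOn with
  | nil => simp [powL]
  | append_singleton l a ih =>
    unfold powL at *
    rw [List.foldl_append, List.foldl_append]
    simp only [List.foldl_cons, List.foldl_nil]
    rw [ih, List.map_append, List.map_map, List.map_map]
    congr 1
    apply List.map_congr_left
    intro S _
    simp [List.foldl_append]

-- characterisation of A ----------------------------------------------------

theorem tail_sublist_of_cons_sublist_notmem (x : List Int) (S' l₂ : List (List Int)) :
    ∀ l₁ : List (List Int), x ∉ l₁ → (x :: S').Sublist (l₁ ++ x :: l₂) → S'.Sublist l₂ := by
  intro l₁
  induction l₁ with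
  | nil =>
    intro _ h
    rw [List.nil_append] at h
    exact List.cons_sublist_cons.mp h
  | cons a t ih =>
    intro hx h
    have hne : x ≠ a := fun e => hx (by simp [e])
    rw [List.cons_append] at h
    cases h with
    | cons _ h' => exact ih (fun hm => hx (by simp [hm])) h'
    | cons₂ _ h' => exact absurd rfl hne

theorem aux_characterisation (p : List (List Int)) (i : Int) (m : List Int) :
    ∀ (n : Nat) (c : List (List Int)) (ind : Int), auxMeasure p c = n →
    (aux p c i m ind = true ↔
      ∃ S, S.Sublist (cand p c ind) ∧ (S.length : Int) = i - c.length ∧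
        valid p (c ++ S) m = true) := by
  intro n
  induction n using Nat.strong_induction_on with
  | _ n ih =>
  intro c ind hn
  rw [aux]
  by_cases hc : complete p c i ind = true
  · have hci : (c.length : Int) = i := by simpa [complete] using hc
    rw [if_pos hc]
    constructor
    · intro hv
      exact ⟨[], by simp, by simp only [List.length_nil, Nat.cast_zero]; omega, by simpa using hv⟩
    · rintro ⟨S, _, hlen, hval⟩
      have h0 : S.length = 0 := by omega
      rw [List.length_eq_zero_iff.mp h0] at hval
      simpa using hval
  · have hci : (c.length : Int) ≠ i := by
      intro e
      exact hc (by simpa [complete] using e)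
    rw [if_neg hc, List.any_eq_true]
    constructor
    · rintro ⟨⟨x, hxext⟩, -, hx⟩
      have hxc : x ∈ cand p c ind :=
        (mem_cand p c ind x).mpr ((mem_extensions p c ind x).mp hxext)
      have hmlt : auxMeasure p (c ++ [x]) < n := hn ▸ auxMeasure_lt p c ind x hxext
      rw [ih _ hmlt (c ++ [x]) (pyIdx p x) rfl] at hx
      obtain ⟨S', hS', hlen', hval'⟩ := hx
      obtain ⟨l₁, l₂, hdec, hxl₁, hcand'⟩ := cand_suffix p c ind x hxc
      refine ⟨x :: S', ?_, ?_, ?_⟩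
      · rw [hdec]
        have h1 : (x :: S').Sublist (x :: l₂) :=
          List.cons_sublist_cons.mpr (hcand' ▸ hS')
        exact h1.trans (List.sublist_append_right l₁ (x :: l₂))
      · simp only [List.length_append, List.length_cons, List.length_nil] at hlen' ⊢
        push_cast at hlen' ⊢
        omega
      · have hass : (c ++ [x]) ++ S' = c ++ x :: S' := by simp
        rwa [hass] at hval'
    · rintro ⟨S, hS, hlen, hval⟩
      have hSne : S ≠ [] := by
        intro e
        subst e
        simp at hlen
        omega
      obtain ⟨x, S', rfl⟩ := List.exists_cons_of_ne_nil hSne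
      have hxc : x ∈ cand p c ind := hS.subset (by simp)
      have hxext : x ∈ extensions p c ind :=
        (mem_extensions p c ind x).mpr ((mem_cand p c ind x).mp hxc)
      obtain ⟨l₁, l₂, hdec, hxl₁, hcand'⟩ := cand_suffix p c ind x hxc
      have hS'l₂ : S'.Sublist l₂ := by
        apply tail_sublist_of_cons_sublist_notmem x S' l₂ l₁ hxl₁
        rw [← hdec]
        exact hS
      have hmlt : auxMeasure p (c ++ [x]) < n := hn ▸ auxMeasure_lt p c ind x hxext
      refine ⟨⟨x, hxext⟩, List.mem_attach _ _, ?_⟩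
      rw [ih _ hmlt (c ++ [x]) (pyIdx p x) rfl]
      refine ⟨S', ?_, ?_, ?_⟩
      · rw [hcand']
        exact hS'l₂
      · simp only [List.length_append, List.length_cons, List.length_nil] at hlen ⊢
        push_cast at hlen ⊢
        omega
      · have hass : (c ++ [x]) ++ S' = c ++ x :: S' := by simp
        rw [hass]
        exact hval

-- B computes the same ------------------------------------------------------

theorem aux_alt_characterisation (p c : List (List Int)) (i : Int) (m : List Int) (ind : Int) :
    (aux_alt p c i m ind = true ↔
      ∃ S, S.Sublist (cand p c ind) ∧ (S.length : Int) = i - c.length ∧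
        valid p (c ++ S) m = true) := by
  simp only [aux_alt]
  by_cases hneg : (i - (c.length : Int)) < 0
  · rw [if_pos hneg]
    constructor
    · intro h
      simp at h
    · rintro ⟨S, _, hlen, _⟩
      omega
  · rw [if_neg hneg, partials_eq, List.any_eq_true]
    constructor
    · rintro ⟨uk, huk, hpred⟩
      obtain ⟨S, hS, rfl⟩ := List.mem_map.mp huk
      simp only [Bool.and_eq_true, beq_iff_eq] at hpred
      refine ⟨S, (mem_powL (cand p c ind) S).mp hS, hpred.1, ?_⟩
      unfold valid
      rw [unionAll_append]
      simpa using hpred.2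
    · rintro ⟨S, hS, hlen, hval⟩
      refine ⟨(S.foldl (fun s x => PySem.Set.union s x) (unionAll c), (S.length : Int)),
        List.mem_map.mpr ⟨S, (mem_powL (cand p c ind) S).mpr hS, rfl⟩, ?_⟩
      simp only [Bool.and_eq_true, beq_iff_eq]
      refine ⟨hlen, ?_⟩
      unfold valid at hval
      rw [unionAll_append] at hval
      simpa using hval

-- ===== VERDICT (by name: the statement is the Claim_ definition above) =====
theorem aux_spec : Claim_equal_aux := by
  intro p c i m ind _
  unfold Spec_aux
  have h1 := aux_characterisation p i m (auxMeasure p c) c ind rfl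
  have h2 := aux_alt_characterisation p c i m ind
  by_cases h : aux p c i m ind = true
  · rw [h, Eq.comm, h2]
    exact h1.mp h
  · have hb : aux p c i m ind = false := by
      cases hx : aux p c i m ind
      · rfl
      · exact absurd hx h
    rw [hb, Eq.comm]
    rw [Bool.eq_false_iff, Ne, h2]
    intro hc
    exact h (h1.mpr hc)
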